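-- pv_equiv track=rewrite | github.com/Lianghui818/CS162 | module6/row_puzzle.py | row_puzzle
-- ===== SOURCE A (Python) =====
-- def row_puzzle(row, pos=0, visited=None):
--     if visited is None:
--         visited = set()         # empty set for memoization
--
--     if pos in visited or pos < 0 or pos >= len(row):        # out of range
--         return False
--
--     visited.add(pos)        # add solutions into set
--
--     if row[pos] == 0 and pos == len(row) - 1:       # reaches 0 in the rightmost square
--         return True
--
--     return row_puzzle(row, pos + row[pos], visited) or row_puzzle(row, pos - row[pos], visited)         # recursive
-- ===== SOURCE B (Python) =====
-- def row_puzzle(row, pos=0, visited=None):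
--     if visited is None:
--         visited = set()
--     stack = [pos]
--     while stack:
--         p = stack.pop()
--         if p in visited or p < 0 or p >= len(row):
--             continue
--         visited.add(p)
--         if row[p] == 0 and p == len(row) - 1:
--             return True
--         stack.append(p - row[p])
--         stack.append(p + row[p])
--     return False
-- ===== Notes on version B (the rewrite author's own statement) =====
-- stated objective: alternative
-- what changed: Replaces A's recursion (with 'or' over two recursive calls) by an iterative DFS with an explicit stack and a while loop; same global visited set, same '+' branch explored first, stopping at the first success.
import Mathlib
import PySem

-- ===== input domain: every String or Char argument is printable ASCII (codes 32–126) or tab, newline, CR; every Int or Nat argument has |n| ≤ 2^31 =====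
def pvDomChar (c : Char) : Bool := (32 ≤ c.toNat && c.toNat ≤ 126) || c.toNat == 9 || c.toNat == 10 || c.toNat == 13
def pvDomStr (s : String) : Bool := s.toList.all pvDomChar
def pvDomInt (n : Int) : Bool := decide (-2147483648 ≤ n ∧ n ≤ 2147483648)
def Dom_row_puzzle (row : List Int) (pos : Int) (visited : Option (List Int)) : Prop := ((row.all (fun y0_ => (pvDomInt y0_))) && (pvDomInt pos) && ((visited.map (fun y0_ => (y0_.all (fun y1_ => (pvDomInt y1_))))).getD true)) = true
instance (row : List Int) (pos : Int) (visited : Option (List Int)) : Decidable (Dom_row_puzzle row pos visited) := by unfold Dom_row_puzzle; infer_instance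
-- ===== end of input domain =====

-- B replaces A's recursive DFS by an iterative DFS with an explicit stack ('+' branch explored
-- first, same guard, stop at first success); equivalence is about the RETURN value only — both
-- mutate the caller's visited set, and on a successful run the final set contents may differ.



-- measure helper and the one lemma rpBloop's decreasing_by needs (stated above the port for that reason)
def pvUnvisited (row : List Int) (vis : PySem.Set Int) : Nat :=
  (List.range row.length).countP (fun i : Nat => !(vis.contains (Int.ofNat i)))

theorem pvUnvisited_add_lt (row : List Int) (vis : PySem.Set Int) (p : Int)
    (hnc : vis.contains p = false) (h0 : 0 ≤ p) (hlt : p < (row.length : Int)) :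
    pvUnvisited row (vis.add p) < pvUnvisited row vis := by
  have hcast : ((p.toNat : Nat) : Int) = p := by omega
  have hadd : ∀ i : Int, (vis.add p).contains i = (vis.contains i || i == p) := by
    intro i
    by_cases hp : p ∈ vis
    · simp [PySem.Set.add, PySem.Set.contains, hp]
      intro h; subst h; simp [hp]
    · simp [PySem.Set.add, PySem.Set.contains, hp, List.mem_append]
      rcases h : (i == p) <;> simp at h <;> simp [h]
  have hmono : ∀ a : Nat, (!(vis.add p).contains (Int.ofNat a)) = true →
      (!(vis.contains (Int.ofNat a))) = true := by
    intro a h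
    simp [hadd] at h
    simpa using h.1
  have hwit : p.toNat ∈ List.range row.length := by
    simp only [List.mem_range]; omega
  unfold pvUnvisited
  generalize List.range row.length = l at hwit
  induction l with
  | nil => cases hwit
  | cons x xs ih =>
    rcases List.mem_cons.1 hwit with rfl | hx
    · have h1 : (!(vis.contains (Int.ofNat p.toNat))) = true := by
        simp only [Int.ofNat_eq_natCast, hcast, hnc, Bool.not_false]
      have h2 : (!(vis.add p).contains (Int.ofNat p.toNat)) = false := by
        simp only [Int.ofNat_eq_natCast, hcast, hadd, hnc]
        simp
      simp only [List.countP_cons, h1, h2, Bool.false_eq_true, if_false, reduceIte]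
      have := List.countP_mono_left (l := xs)
        (p := fun i : Nat => !(vis.add p).contains (Int.ofNat i))
        (q := fun i : Nat => !(vis.contains (Int.ofNat i))) (fun a _ => hmono a)
      omega
    · have hstep := ih hx
      rcases hN : (!(vis.add p).contains (Int.ofNat x)) with _ | _
      · rcases hO : (!(vis.contains (Int.ofNat x))) with _ | _ <;>
          simp only [List.countP_cons, hN, hO, Bool.false_eq_true, if_false, reduceIte] <;>
          omega
      · have hO := hmono x hN
        simp only [List.countP_cons, hN, hO, reduceIte]
        omega

-- ===== PORT A =====
-- A is recursive and MUTATES visited: the faithful port threads the set through and returns it.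
-- The fuel row.length + 1 only makes the recursion structurally total; it is never exhausted
-- (each recursive call first marks a fresh in-range position, so depth ≤ row.length).
def rpA (row : List Int) : Nat → Int → PySem.Set Int → Bool × PySem.Set Int
  | 0, _, vis => (false, vis)
  | fuel + 1, pos, vis =>
    if vis.contains pos || decide (pos < 0) || decide ((row.length : Int) ≤ pos) then
      (false, vis)
    else
      let vis' := vis.add pos
      if decide (PySem.List.pyGetD row pos 0 = 0) && decide (pos = (row.length : Int) - 1) then
        (true, vis')
      else
        let r1 := rpA row fuel (pos + PySem.List.pyGetD row pos 0) vis'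
        if r1.1 then r1 else rpA row fuel (pos - PySem.List.pyGetD row pos 0) r1.2

def row_puzzle (row : List Int) (pos : Int) (visited : Option (List Int)) : Bool :=
  let vis : PySem.Set Int :=
    match visited with
    | none => PySem.Set.empty
    | some l => PySem.Set.ofList l
  (rpA row (row.length + 1) pos vis).1

-- ===== PORT B =====
-- iterative DFS: pop, apply the guard, push p - row[p] then p + row[p]
def rpBloop (row : List Int) (stack : List Int) (vis : PySem.Set Int) : Bool :=
  match stack with
  | [] => false
  | p :: rest =>
    if h : vis.contains p || decide (p < 0) || decide ((row.length : Int) ≤ p) then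
      rpBloop row rest vis
    else
      let d := PySem.List.pyGetD row p 0
      if decide (d = 0) && decide (p = (row.length : Int) - 1) then true
      else rpBloop row ((p + d) :: (p - d) :: rest) (vis.add p)
termination_by (pvUnvisited row vis, stack.length)
decreasing_by
  · exact Prod.Lex.right _ (by simp)
  · exact Prod.Lex.left _ _ (by
      simp only [Bool.or_eq_true, decide_eq_true_eq, not_or] at h
      exact pvUnvisited_add_lt row vis p (by simpa [PySem.Set.contains] using h.1.1) (by omega) (by omega))

def row_puzzle_alt (row : List Int) (pos : Int) (visited : Option (List Int)) : Bool :=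
  let vis : PySem.Set Int :=
    match visited with
    | none => PySem.Set.empty
    | some l => PySem.Set.ofList l
  rpBloop row [pos] vis

-- ===== PRECONDITION & SPEC =====
def Spec_row_puzzle (row : List Int) (pos : Int) (visited : Option (List Int)) (out : Bool) : Prop := out = row_puzzle_alt row pos visited
instance (row : List Int) (pos : Int) (visited : Option (List Int)) (out : Bool) : Decidable (Spec_row_puzzle row pos visited out) := by unfold Spec_row_puzzle; infer_instance

-- ===== CLAIM (what is proved, stated in full; the proofs are below) =====
def Claim_equal_row_puzzle : Prop := ∀ (row : List Int) (pos : Int) (visited : Option (List Int)), Dom_row_puzzle row pos visited → Spec_row_puzzle row pos visited (row_puzzle row pos visited)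

-- ===== LEMMAS AND PROOFS =====

theorem pv_contains_add (vis : PySem.Set Int) (p i : Int) :
    (vis.add p).contains i = (vis.contains i || i == p) := by
  by_cases hp : p ∈ vis
  · simp [PySem.Set.add, PySem.Set.contains, hp]
    intro h; subst h; simp [hp]
  · simp [PySem.Set.add, PySem.Set.contains, hp, List.mem_append]
    rcases h : (i == p) <;> simp at h <;> simp [h]

theorem pv_contains_mono_add (vis : PySem.Set Int) (p i : Int)
    (h : vis.contains i = true) : (vis.add p).contains i = true := by
  rw [pv_contains_add, h]; rfl

theorem rpA_contains_mono (row : List Int) :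
    ∀ (fuel : Nat) (pos : Int) (vis : PySem.Set Int) (i : Int),
      vis.contains i = true → (rpA row fuel pos vis).2.contains i = true := by
  intro fuel
  induction fuel with
  | zero => intro pos vis i h; simpa [rpA] using h
  | succ f ih =>
    intro pos vis i h
    rw [rpA]
    split
    · simpa using h
    · split
      · simpa using pv_contains_mono_add vis pos i h
      · simp only []
        split
        · exact ih _ _ _ (pv_contains_mono_add vis pos i h)
        · exact ih _ _ _ (ih _ _ _ (pv_contains_mono_add vis pos i h))

theorem pvUnvisited_rpA_le (row : List Int) (fuel : Nat) (pos : Int) (vis : PySem.Set Int) :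
    pvUnvisited row (rpA row fuel pos vis).2 ≤ pvUnvisited row vis := by
  unfold pvUnvisited
  apply List.countP_mono_left
  intro a _ h
  simp only [Bool.not_eq_eq_eq_not, Bool.not_true] at h ⊢
  rcases hc : vis.contains (Int.ofNat a) with _ | _
  · rfl
  · have := rpA_contains_mono row fuel pos vis _ hc
    rw [this] at h; exact Bool.noConfusion h

theorem rpB_rpA (row : List Int) :
    ∀ (n : Nat), ∀ (vis : PySem.Set Int), pvUnvisited row vis ≤ n →
    ∀ (fuel : Nat) (pos : Int) (stack : List Int), pvUnvisited row vis < fuel →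
      rpBloop row (pos :: stack) vis =
        (if (rpA row fuel pos vis).1 then true else rpBloop row stack (rpA row fuel pos vis).2) := by
  intro n
  induction n with
  | zero =>
    intro vis hn fuel pos stack hf
    obtain ⟨f, rfl⟩ : ∃ f, fuel = f + 1 := ⟨fuel - 1, by omega⟩
    rw [rpBloop, rpA]
    by_cases hmem : pos ∈ vis
    · simp [hmem, PySem.Set.contains]
    · by_cases hneg : pos < 0
      · simp [hneg]
      · by_cases hge : (row.length : Int) ≤ pos
        · simp [hge]
        · exfalso
          have := pvUnvisited_add_lt row vis pos (by simp [PySem.Set.contains, hmem])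
            (by omega) (by omega)
          omega
  | succ m ih =>
    intro vis hn fuel pos stack hf
    obtain ⟨f, rfl⟩ : ∃ f, fuel = f + 1 := ⟨fuel - 1, by omega⟩
    rw [rpBloop, rpA]
    by_cases hmem : pos ∈ vis
    · simp [hmem, PySem.Set.contains]
    · by_cases hneg : pos < 0
      · simp [hneg]
      · by_cases hge : (row.length : Int) ≤ pos
        · simp [hge]
        · have hgB : (vis.contains pos || decide (pos < 0) || decide ((row.length : Int) ≤ pos)) = false := by
            simp [PySem.Set.contains, hmem, hneg, hge]
          have hcf : vis.contains pos = false := by simp [PySem.Set.contains, hmem]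
          have hlt := pvUnvisited_add_lt row vis pos hcf (by omega) (by omega)
          by_cases ht : PySem.List.pyGetD row pos 0 = 0 ∧ pos = (row.length : Int) - 1
          · have htB : (decide (PySem.List.pyGetD row pos 0 = 0) &&
                decide (pos = (row.length : Int) - 1)) = true := by
              rw [decide_eq_true ht.1, decide_eq_true ht.2]; rfl
            simp only [hgB, htB, Bool.false_eq_true, if_false, if_true]
            simp
          · have htB : (decide (PySem.List.pyGetD row pos 0 = 0) &&
                decide (pos = (row.length : Int) - 1)) = false := by simp; tauto
            set d := PySem.List.pyGetD row pos 0 with hd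
            set vis' := vis.add pos with hvis'
            have h1 : rpBloop row ((pos + d) :: (pos - d) :: stack) vis' =
                (if (rpA row f (pos + d) vis').1 then true
                 else rpBloop row ((pos - d) :: stack) (rpA row f (pos + d) vis').2) :=
              ih vis' (by omega) f (pos + d) ((pos - d) :: stack) (by omega)
            have hle1 : pvUnvisited row (rpA row f (pos + d) vis').2 ≤ pvUnvisited row vis' :=
              pvUnvisited_rpA_le row f (pos + d) vis'
            have h2 : rpBloop row ((pos - d) :: stack) (rpA row f (pos + d) vis').2 =
                (if (rpA row f (pos - d) (rpA row f (pos + d) vis').2).1 then true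
                 else rpBloop row stack (rpA row f (pos - d) (rpA row f (pos + d) vis').2).2) :=
              ih _ (by omega) f (pos - d) stack (by omega)
            simp only [hgB, htB, Bool.false_eq_true, if_false]
            rw [h1]
            by_cases hb : (rpA row f (pos + d) vis').1 = true
            · simp [hb]
            · simp only [hb, Bool.false_eq_true, if_false] at *
              rw [h2]
              by_cases hb2 : (rpA row f (pos - d) (rpA row f (pos + d) vis').2).1 = true
              · simp [hb2]
              · simp [hb2]

theorem final (row : List Int) (pos : Int) (vis : PySem.Set Int) :
    rpBloop row [pos] vis = (rpA row (row.length + 1) pos vis).1 := by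
  have hle : pvUnvisited row vis ≤ row.length := by
    unfold pvUnvisited
    exact le_trans List.countP_le_length (by simp)
  rw [rpB_rpA row (pvUnvisited row vis) vis le_rfl (row.length + 1) pos [] (by omega)]
  rcases h : (rpA row (row.length + 1) pos vis).1 <;> simp [rpBloop]

-- ===== VERDICT (by name: the statement is the Claim_ definition above) =====
theorem row_puzzle_spec : Claim_equal_row_puzzle := by
  intro row pos visited _
  unfold Spec_row_puzzle row_puzzle row_puzzle_alt
  cases visited <;> exact (final row pos _).symm
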